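-- pv_equiv track=rewrite | github.com/Dona-Donka/PWR_Big_Data_Analytics | List02.py | task04
-- ===== SOURCE A (Python) =====
-- def task04(listA, listB):
--     listA = [x for x in listA if len(x) == len(listA[0])]
--     index = 2
--     for i in range(1,len(listB)):
--         if len(listB[i]) ==len(listA[0]):
--             listA.insert(-1 + index, listB[i])
--             index +=2
--
--     return listA
-- ===== SOURCE B (Python) =====
-- def task04(listA, listB):
--     if not listA:
--         return []
--     L = len(listA[0])
--     fa = [x for x in listA if len(x) == L]
--     bs = [x for x in listB[1:] if len(x) == L]
--     out = []
--     i = 0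
--     while i < len(fa) or i < len(bs):
--         if i < len(fa):
--             out.append(fa[i])
--         if i < len(bs):
--             out.append(bs[i])
--         i += 1
--     return out
-- ===== Notes on version B (the rewrite author's own statement) =====
-- stated objective: faster
-- what changed: B filters both lists once and builds the result in a single interleaving pass, instead of A's repeated list.insert into the growing list (each insert shifts the tail).
import Mathlib
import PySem

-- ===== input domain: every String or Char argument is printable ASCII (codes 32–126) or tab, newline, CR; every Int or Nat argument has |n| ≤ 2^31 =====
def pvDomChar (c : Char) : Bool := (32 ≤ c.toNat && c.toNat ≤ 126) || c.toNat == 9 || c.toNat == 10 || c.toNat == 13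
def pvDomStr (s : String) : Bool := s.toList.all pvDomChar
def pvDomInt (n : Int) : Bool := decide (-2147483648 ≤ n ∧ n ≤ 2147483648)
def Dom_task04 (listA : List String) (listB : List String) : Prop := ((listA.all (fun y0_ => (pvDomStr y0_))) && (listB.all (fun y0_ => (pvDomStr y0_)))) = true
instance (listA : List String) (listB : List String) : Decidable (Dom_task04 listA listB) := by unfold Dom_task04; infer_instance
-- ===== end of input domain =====

-- B replaces A's repeated list.insert (each shifting the tail of the growing list) by one filter of each
-- list plus a single interleaving pass; objective: faster (asymptotic, measured by the check).

-- ===== PORT A =====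
-- 'len(listA[0])' in the comprehension / loop body: ported as '(·.headD "").length'; the default "" is only
-- reached when the list is empty, exactly where Python raises IndexError (excluded by Pre_task04).
def task04 (listA : List String) (listB : List String) : List String :=
  let listA1 := listA.filter (fun x => PySem.Str.len x == PySem.Str.len (listA.headD ""))
  let r := (PySem.List.pyRange 1 (PySem.List.len listB) 1).foldl
    (fun s i =>
      -- listB[i] with i drawn from range(1, len(listB)) is always in range, so pyGetD is exact here
      if PySem.Str.len (PySem.List.pyGetD listB i "") == PySem.Str.len (s.1.headD "") then
        (PySem.List.insert s.1 (-1 + s.2) (PySem.List.pyGetD listB i ""), s.2 + 2)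
      else s)
    (listA1, (2 : Int))
  r.1

-- ===== PORT B =====
-- port of Source B's while-loop: at each step emit fa[i] (if any) then bs[i] (if any)
def pvInterleave : List String → List String → List String
  | [], ys => ys
  | x :: xs, [] => x :: xs
  | x :: xs, y :: ys => x :: y :: pvInterleave xs ys

def task04_alt (listA : List String) (listB : List String) : List String :=
  if listA = [] then []
  else
    let L := PySem.Str.len (listA.headD "")
    let fa := listA.filter (fun x => PySem.Str.len x == L)
    let bs := (PySem.List.slice listB (some 1) none).filter (fun x => PySem.Str.len x == L)
    pvInterleave fa bs

-- ===== PRECONDITION & SPEC =====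
-- Pre_ excludes exactly the inputs where A raises IndexError: listA empty while the loop over listB runs.
def Pre_task04 (listA : List String) (listB : List String) : Prop :=
  listA ≠ [] ∨ listB.length ≤ 1
instance (listA : List String) (listB : List String) : Decidable (Pre_task04 listA listB) := by
  unfold Pre_task04; infer_instance

def pvWitness_task04 : List String × List String := (["ab", "c", "de"], ["x", "yz", "q"])

def Spec_task04 (listA : List String) (listB : List String) (out : List String) : Prop :=
  out = task04_alt listA listB
instance (listA : List String) (listB : List String) (out : List String) : Decidable (Spec_task04 listA listB out) := by
  unfold Spec_task04; infer_instance

-- ===== CLAIM (what is proved, stated in full; the proofs are below) =====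
def Claim_equal_task04 : Prop := ∀ (listA : List String) (listB : List String), Dom_task04 listA listB → Pre_task04 listA listB → Spec_task04 listA listB (task04 listA listB)

-- ===== LEMMAS AND PROOFS =====

theorem pvInterleave_nil_right (xs : List String) : pvInterleave xs [] = xs := by
  cases xs <;> rfl

theorem pvInsert_of_length_le (xs : List String) (i : Int) (v : String)
    (h : (xs.length : Int) ≤ i) : PySem.List.insert xs i v = xs ++ [v] := by
  have h0 : (0 : Int) ≤ i := le_trans (by positivity) h
  simp only [PySem.List.insert, PySem.List.sliceIndices]
  norm_num
  rw [if_neg (by omega), min_eq_right h]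
  simp

theorem pvLoop (a : String) (ys : List String) : ∀ (pre fa : List String) (idx : Int),
    pre ++ fa ≠ [] →
    (pre ++ fa).headD "" = a →
    (fa ≠ [] → idx = (pre.length : Int) + 2) →
    ((pre.length : Int) + 2 ≤ idx) →
    (ys.foldl
      (fun s y =>
        if PySem.Str.len y == PySem.Str.len (s.1.headD "") then
          (PySem.List.insert s.1 (-1 + s.2) y, s.2 + 2)
        else s)
      (pre ++ fa, idx)).1
      = pre ++ pvInterleave fa (ys.filter (fun y => PySem.Str.len y == PySem.Str.len a)) := by
  induction ys with
  | nil => intro pre fa idx _ hh _ _; simp [pvInterleave_nil_right]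
  | cons y ys ih =>
    intro pre fa idx hne hh hidx hle
    simp only [List.foldl_cons, List.filter_cons]
    rw [hh]
    by_cases hp : (PySem.Str.len y == PySem.Str.len a) = true
    · rw [if_pos hp, if_pos hp]
      cases fa with
      | nil =>
        rw [List.append_nil] at hh hne ⊢
        have hins : PySem.List.insert pre (-1 + idx) y = pre ++ [y] := by
          apply pvInsert_of_length_le; omega
        rw [hins]
        have := ih (pre ++ [y]) [] (idx + 2) (by simp)
          (by
            cases pre with
            | nil => cases hne rfl
            | cons p ps => simpa using hh)
          (by intro h; exact absurd rfl h) (by simp; omega)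
        simpa [pvInterleave] using this
      | cons f fs =>
        have hidx' : idx = (pre.length : Int) + 2 := hidx (by simp)
        have hpos : -1 + idx = (((pre ++ [f]).length : Nat) : Int) := by
          simp; omega
        have hins : PySem.List.insert (pre ++ f :: fs) (-1 + idx) y
            = pre ++ f :: y :: fs := by
          have : pre ++ f :: fs = (pre ++ [f]) ++ fs := by simp
          rw [this, hpos, PySem.List.insert_natCast _ _ _ (by simp),
            List.take_left, List.drop_left]
          simp
        rw [hins]
        have harr : pre ++ f :: y :: fs = (pre ++ [f, y]) ++ fs := by simp
        rw [harr]
        have := ih (pre ++ [f, y]) fs (idx + 2) (by simp)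
          (by
            have : (pre ++ [f, y]) ++ fs = pre ++ f :: y :: fs := by simp
            rw [this]
            rcases pre with _ | ⟨p, ps⟩
            · simpa using hh
            · simpa using hh)
          (by intro _; simp; omega) (by simp; omega)
        rw [this]
        simp [pvInterleave]
    · rw [if_neg hp, if_neg hp]
      exact ih pre fa idx hne hh hidx hle

-- ===== VERDICT (by name: the statement is the Claim_ definition above) =====
theorem task04_spec : Claim_equal_task04 := by
  intro listA listB _ hpre
  unfold Spec_task04 task04 task04_alt
  cases listA with
  | nil =>
    have hb : listB.length ≤ 1 := by
      rcases hpre with h | h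
      · exact absurd rfl h
      · exact h
    rw [PySem.List.pyRange_one_eq_nil (by rw [PySem.List.len_eq]; omega)]
    simp
  | cons a rest =>
    simp only [List.headD_cons, if_neg (List.cons_ne_nil a rest), PySem.List.slice_from_one]
    have hfa : List.filter (fun x => PySem.Str.len x == PySem.Str.len a) (a :: rest)
        = a :: List.filter (fun x => PySem.Str.len x == PySem.Str.len a) rest := by
      rw [List.filter_cons]
      simp
    rw [hfa, PySem.List.len_eq,
      PySem.List.foldl_pyRange_pyGetD' listB ""
        (fun s y =>
          if PySem.Str.len y == PySem.Str.len (s.1.headD "") then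
            (PySem.List.insert s.1 (-1 + s.2) y, s.2 + 2)
          else s)
        (a :: List.filter (fun x => PySem.Str.len x == PySem.Str.len a) rest, (2 : Int))
        (by norm_num)]
    have := pvLoop a (listB.drop (1 : Int).toNat) []
      (a :: List.filter (fun x => PySem.Str.len x == PySem.Str.len a) rest) 2
      (by simp) (by simp) (fun _ => by simp) (by simp)
    simp only [List.nil_append] at this
    rw [this]
    simp [List.drop_one]
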